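-- pv_equiv track=rewrite | github.com/snap-stanford/KGReasoning | cqd/util.py | create_instructions
-- ===== SOURCE A (Python) =====
-- def create_instructions(chains):
--     instructions = []
--
--     prev_start = None
--     prev_end = None
--
--     path_stack = []
--     start_flag = True
--     for chain_ind, chain in enumerate(chains):
--         if start_flag:
--             prev_end = chain[-1]
--             start_flag = False
--             continue
--
--         if prev_end == chain[0]:
--             instructions.append(f"hop_{chain_ind-1}_{chain_ind}")
--             prev_end = chain[-1]
--             prev_start = chain[0]
--
--         elif prev_end == chain[-1]:
--
--             prev_start = chain[0]
--             prev_end = chain[-1]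
--
--             instructions.append(f"intersect_{chain_ind-1}_{chain_ind}")
--         else:
--             path_stack.append(([prev_start, prev_end],chain_ind-1))
--             prev_start = chain[0]
--             prev_end = chain[-1]
--             start_flag = False
--             continue
--
--         if len(path_stack) > 0:
--
--             path_prev_start = path_stack[-1][0][0]
--             path_prev_end = path_stack[-1][0][-1]
--
--             if path_prev_end == chain[-1]:
--
--                 prev_start = chain[0]
--                 prev_end = chain[-1]
--
--                 instructions.append(f"intersect_{path_stack[-1][1]}_{chain_ind}")
--                 path_stack.pop()
--                 continue
--
--     ans = []
--     for inst in instructions: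
--         if ans:
--
--             if 'inter' in inst and ('inter' in ans[-1]):
--                     last_ind = inst.split("_")[-1]
--                     ans[-1] = ans[-1]+f"_{last_ind}"
--             else:
--                 ans.append(inst)
--
--         else:
--             ans.append(inst)
--
--     instructions = ans
--     return instructions
-- ===== SOURCE B (Python) =====
-- def create_instructions(chains):
--     # Single pass: emit straight into the final list, merging consecutive
--     # intersect instructions on the fly (tracked by a flag instead of
--     # re-scanning strings), and keep only the pending end on the stack.
--     if not chains:
--         return []
--     ans = []
--     last_inter = False
--     prev_end = chains[0][-1]
--     path_stack = []  # (pending chain end, its index)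
--     for ind, chain in enumerate(chains[1:], start=1):
--         first, last = chain[0], chain[-1]
--         if prev_end == first:
--             ans.append(f"hop_{ind - 1}_{ind}")
--             last_inter = False
--         elif prev_end == last:
--             if last_inter:
--                 ans[-1] += f"_{ind}"
--             else:
--                 ans.append(f"intersect_{ind - 1}_{ind}")
--                 last_inter = True
--         else:
--             path_stack.append((prev_end, ind - 1))
--             prev_end = last
--             continue
--         prev_end = last
--         if path_stack and path_stack[-1][0] == last:
--             if last_inter:
--                 ans[-1] += f"_{ind}"
--             else:
--                 ans.append(f"intersect_{path_stack[-1][1]}_{ind}")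
--                 last_inter = True
--             path_stack.pop()
--     return ans
-- ===== Notes on version B (the rewrite author's own statement) =====
-- stated objective: simpler
-- what changed: B fuses A's two passes into one: instead of building an intermediate instruction list and then running a second merge loop that re-scans strings for 'inter' and re-splits them to recover the trailing index, B emits directly into the final list, tracking 'last emitted was an intersect' with a boolean flag and appending the known index, and drops the never-read prev_start from the stack entries.
import Mathlib
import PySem

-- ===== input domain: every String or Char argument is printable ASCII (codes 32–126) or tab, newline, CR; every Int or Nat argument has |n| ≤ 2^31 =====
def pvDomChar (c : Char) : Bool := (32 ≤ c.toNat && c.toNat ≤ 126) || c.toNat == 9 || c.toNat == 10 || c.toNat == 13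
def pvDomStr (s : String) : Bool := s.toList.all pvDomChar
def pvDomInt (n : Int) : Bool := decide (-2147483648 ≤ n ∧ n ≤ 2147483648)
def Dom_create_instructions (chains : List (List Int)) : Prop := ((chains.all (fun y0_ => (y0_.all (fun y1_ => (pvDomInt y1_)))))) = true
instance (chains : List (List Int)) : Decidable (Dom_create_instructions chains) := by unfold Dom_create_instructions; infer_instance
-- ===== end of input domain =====

-- B fuses A's two passes (build instructions, then merge adjacent intersects) into one pass with a
-- boolean "last emitted was an intersect" flag; same return value on every input where A returns.

-- ===== PORT A =====

-- first-pass loop state of A: instructions, prev_start, prev_end, path_stack, start_flag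
structure StA where
  insts : List String
  prevStart : Option Int
  prevEnd : Option Int
  stack : List ((Option Int × Option Int) × Int)
  flag : Bool
  deriving Repr, DecidableEq

-- the trailing 'if len(path_stack) > 0: …' block of A's loop body
def stackCheckA (ind : Int) (chain : List Int) (s : StA) : StA :=
  match PySem.List.pyGet? s.stack (-1) with     -- path_stack[-1] (absent iff len == 0)
  | none => s
  | some top =>
    if top.1.2 == PySem.List.pyGet? chain (-1) then   -- path_prev_end == chain[-1]
      { s with prevStart := PySem.List.pyGet? chain 0,
               prevEnd := PySem.List.pyGet? chain (-1),
               insts := s.insts ++ ["intersect_" ++ PySem.Int.toStr top.2 ++ "_" ++ PySem.Int.toStr ind],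
               stack := s.stack.dropLast }            -- path_stack.pop()
    else s

-- one iteration of A's first loop (chain[0] / chain[-1] as pyGet?: none = IndexError, excluded by Pre_)
def stepA (s : StA) (p : Int × List Int) : StA :=
  let ind := p.1
  let chain := p.2
  if s.flag then
    { s with prevEnd := PySem.List.pyGet? chain (-1), flag := false }
  else if s.prevEnd == PySem.List.pyGet? chain 0 then
    stackCheckA ind chain
      { s with insts := s.insts ++ ["hop_" ++ PySem.Int.toStr (ind - 1) ++ "_" ++ PySem.Int.toStr ind],
               prevEnd := PySem.List.pyGet? chain (-1),
               prevStart := PySem.List.pyGet? chain 0 }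
  else if s.prevEnd == PySem.List.pyGet? chain (-1) then
    stackCheckA ind chain
      { s with prevStart := PySem.List.pyGet? chain 0,
               prevEnd := PySem.List.pyGet? chain (-1),
               insts := s.insts ++ ["intersect_" ++ PySem.Int.toStr (ind - 1) ++ "_" ++ PySem.Int.toStr ind] }
  else
    { s with stack := s.stack ++ [((s.prevStart, s.prevEnd), ind - 1)],
             prevStart := PySem.List.pyGet? chain 0,
             prevEnd := PySem.List.pyGet? chain (-1),
             flag := false }

-- one iteration of A's second loop ('inter' in inst and in ans[-1] → extend ans[-1] by the split's last piece)
def mergeStepA (ans : List String) (inst : String) : List String :=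
  match ans.getLast? with                        -- 'if ans:'
  | none => ans ++ [inst]
  | some last =>
    if PySem.Str.isIn "inter" inst && PySem.Str.isIn "inter" last then
      let lastInd := (PySem.List.pyGet? ((PySem.Str.split? inst "_").getD []) (-1)).getD ""
      ans.dropLast ++ [last ++ "_" ++ lastInd]   -- ans[-1] = ans[-1] + f"_{last_ind}"
    else ans ++ [inst]

def create_instructions (chains : List (List Int)) : List String :=
  ((PySem.List.enumerate chains 0).foldl stepA ⟨[], none, none, [], true⟩).insts.foldl mergeStepA []

-- ===== PORT B =====

-- B's single-pass state: final answer, 'last emitted was an intersect' flag, prev_end, slim stack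
structure StB where
  ans : List String
  lastInter : Bool
  prevEnd : Option Int
  stack : List (Int × Int)
  deriving Repr, DecidableEq

-- emit an intersect: merge into ans[-1] when the previous emission was an intersect
def emitInterB (s : StB) (i j : Int) : StB :=
  if s.lastInter then
    { s with ans := s.ans.dropLast ++ [(s.ans.getLast?.getD "") ++ "_" ++ PySem.Int.toStr j] }
  else
    { s with ans := s.ans ++ ["intersect_" ++ PySem.Int.toStr i ++ "_" ++ PySem.Int.toStr j],
             lastInter := true }

-- 'if path_stack and path_stack[-1][0] == last: …'
def stackCheckB (ind : Int) (lastc : Option Int) (s : StB) : StB :=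
  match PySem.List.pyGet? s.stack (-1) with
  | none => s
  | some top =>
    if (some top.1 : Option Int) == lastc then
      let s1 := emitInterB s top.2 ind
      { s1 with stack := s1.stack.dropLast }
    else s

def stepB (s : StB) (p : Int × List Int) : StB :=
  let ind := p.1
  let chain := p.2
  let first := PySem.List.pyGet? chain 0
  let lastc := PySem.List.pyGet? chain (-1)
  if s.prevEnd == first then
    stackCheckB ind lastc
      { s with ans := s.ans ++ ["hop_" ++ PySem.Int.toStr (ind - 1) ++ "_" ++ PySem.Int.toStr ind],
               lastInter := false, prevEnd := lastc }
  else if s.prevEnd == lastc then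
    stackCheckB ind lastc { emitInterB s (ind - 1) ind with prevEnd := lastc }
  else
    { s with stack := s.stack ++ [(s.prevEnd.getD 0, ind - 1)], prevEnd := lastc }

def create_instructions_alt (chains : List (List Int)) : List String :=
  match chains with
  | [] => []
  | c0 :: rest =>
    ((PySem.List.enumerate rest 1).foldl stepB
        ⟨[], false, PySem.List.pyGet? c0 (-1), []⟩).ans

-- ===== PRECONDITION & SPEC =====
-- Pre_ excludes exactly the inputs containing an empty chain, on which Python A raises IndexError
-- (chain[-1] / chain[0] on an empty list).
def Pre_create_instructions (chains : List (List Int)) : Prop := ∀ c ∈ chains, c ≠ []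
instance (chains : List (List Int)) : Decidable (Pre_create_instructions chains) := by unfold Pre_create_instructions; infer_instance

def pvWitness_create_instructions : List (List Int) := [[1, 2], [2, 3], [5, 3]]

def Spec_create_instructions (chains : List (List Int)) (out : List String) : Prop := out = create_instructions_alt chains
instance (chains : List (List Int)) (out : List String) : Decidable (Spec_create_instructions chains out) := by unfold Spec_create_instructions; infer_instance

-- ===== CLAIM (what is proved, stated in full; the proofs are below) =====
def Claim_equal_create_instructions : Prop := ∀ (chains : List (List Int)), Dom_create_instructions chains → Pre_create_instructions chains → Spec_create_instructions chains (create_instructions chains)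

-- ===== LEMMAS AND PROOFS =====

-- characters of str(n): a minus sign or decimal digits
theorem pv_digitChar_isDigit {k : Nat} (h : k < 10) : (Nat.digitChar k).isDigit = true := by
  interval_cases k <;> decide

theorem pv_toDigitsCore_mem (f n : Nat) (acc : List Char) (c : Char)
    (h : c ∈ Nat.toDigitsCore 10 f n acc) : c ∈ acc ∨ c.isDigit = true := by
  induction f generalizing n acc with
  | zero => simp [Nat.toDigitsCore] at h; exact Or.inl h
  | succ f ih =>
    simp only [Nat.toDigitsCore] at h
    split at h
    · rcases List.mem_cons.mp h with h | h
      · exact Or.inr (h ▸ pv_digitChar_isDigit (Nat.mod_lt _ (by norm_num)))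
      · exact Or.inl h
    · rcases ih _ _ h with h | h
      · rcases List.mem_cons.mp h with h | h
        · exact Or.inr (h ▸ pv_digitChar_isDigit (Nat.mod_lt _ (by norm_num)))
        · exact Or.inl h
      · exact Or.inr h

theorem pv_mem_toChars (n : Int) (c : Char) (h : c ∈ PySem.Int.toChars n) :
    c = '-' ∨ c.isDigit = true := by
  unfold PySem.Int.toChars at h
  split at h
  · rcases List.mem_cons.mp h with h | h
    · exact Or.inl h
    · rcases pv_toDigitsCore_mem _ _ _ _ h with h | h
      · simp at h
      · exact Or.inr h
  · rcases pv_toDigitsCore_mem _ _ _ _ h with h | h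
    · simp at h
    · exact Or.inr h

theorem pv_e_not_mem_toChars (n : Int) : ('e' : Char) ∉ PySem.Int.toChars n := by
  intro h
  rcases pv_mem_toChars n _ h with h | h <;> simp_all

theorem pv_und_not_mem_toChars (n : Int) : ('_' : Char) ∉ PySem.Int.toChars n := by
  intro h
  rcases pv_mem_toChars n _ h with h | h <;> simp_all

-- 'inter' in s  facts
theorem pv_isIn_false_of_e_not_mem (l : List Char) (h : ('e' : Char) ∉ l) :
    PySem.Chars.isIn "inter".toList l = false := by
  rw [PySem.Chars.isIn_eq_false_iff]
  intro hinf
  exact h (hinf.subset (by decide))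

theorem pv_isIn_hop (i j : Int) :
    PySem.Str.isIn "inter" ("hop_" ++ PySem.Int.toStr i ++ "_" ++ PySem.Int.toStr j) = false := by
  rw [show PySem.Str.isIn "inter" ("hop_" ++ PySem.Int.toStr i ++ "_" ++ PySem.Int.toStr j)
        = PySem.Chars.isIn "inter".toList ("hop_" ++ PySem.Int.toStr i ++ "_" ++ PySem.Int.toStr j).toList
      from by simp]
  apply pv_isIn_false_of_e_not_mem
  simp only [String.toList_append, PySem.Int.toList_toStr]
  intro h
  rcases List.mem_append.mp h with h | h
  · rcases List.mem_append.mp h with h | h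
    · rcases List.mem_append.mp h with h | h
      · revert h; decide
      · exact pv_e_not_mem_toChars i h
    · revert h; decide
  · exact pv_e_not_mem_toChars j h

theorem pv_isIn_inter_prefix (t : List Char) :
    PySem.Chars.isIn "inter".toList ("inter".toList ++ t) = true := by
  have : "inter".toList <:+: "inter".toList ++ t := ⟨[], t, by simp⟩
  rw [PySem.Chars.isIn_iff_infix]
  exact this

theorem pv_isIn_interStr (i j : Int) :
    PySem.Str.isIn "inter" ("intersect_" ++ PySem.Int.toStr i ++ "_" ++ PySem.Int.toStr j) = true := by
  rw [show PySem.Str.isIn "inter" ("intersect_" ++ PySem.Int.toStr i ++ "_" ++ PySem.Int.toStr j)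
        = PySem.Chars.isIn "inter".toList ("intersect_" ++ PySem.Int.toStr i ++ "_" ++ PySem.Int.toStr j).toList
      from by simp]
  rw [show ("intersect_" ++ PySem.Int.toStr i ++ "_" ++ PySem.Int.toStr j).toList
        = "inter".toList ++ ("sect_".toList ++ (PySem.Int.toStr i).toList ++ "_".toList ++ (PySem.Int.toStr j).toList)
      from by simp [String.toList_append]]
  exact pv_isIn_inter_prefix _

theorem pv_isIn_append (l t : String) (h : PySem.Str.isIn "inter" l = true) :
    PySem.Str.isIn "inter" (l ++ t) = true := by
  rw [PySem.Str.isIn_iff_infix] at h ⊢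
  rw [String.toList_append]
  exact h.trans ((List.prefix_append _ _).isInfix)

-- split("_") of a fresh intersect instruction
theorem pv_splitGo_nil (f : Nat) (cur : List Char) (acc : List (List Char)) :
    PySem.Chars.splitOn.go ['_'] f [] cur acc = (cur.reverse :: acc).reverse := by
  cases f <;> simp [PySem.Chars.splitOn.go]

theorem pv_splitGo_sep (f : Nat) (b cur : List Char) (acc : List (List Char)) :
    PySem.Chars.splitOn.go ['_'] (f + 1) ('_' :: b) cur acc
      = PySem.Chars.splitOn.go ['_'] f b [] (cur.reverse :: acc) := by
  simp [PySem.Chars.splitOn.go, List.isPrefixOf]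

theorem pv_splitGo_no_sep (a : List Char) (ha : '_' ∉ a) :
    ∀ (f : Nat) (l cur : List Char) (acc : List (List Char)), a.length < f →
    PySem.Chars.splitOn.go ['_'] f (a ++ l) cur acc
      = PySem.Chars.splitOn.go ['_'] (f - a.length) l (a.reverse ++ cur) acc := by
  induction a with
  | nil => intro f l cur acc _; simp
  | cons c a ih =>
    intro f l cur acc hf
    match f, hf with
    | f + 1, hf =>
      have hne : c ≠ '_' := fun h => ha (by simp [h])
      have ha' : '_' ∉ a := fun h => ha (List.mem_cons_of_mem _ h)
      have step : PySem.Chars.splitOn.go ['_'] (f + 1) ((c :: a) ++ l) cur acc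
          = PySem.Chars.splitOn.go ['_'] f (a ++ l) (c :: cur) acc := by
        simp [PySem.Chars.splitOn.go, List.isPrefixOf, Ne.symm hne]
      rw [step, ih ha' f l (c :: cur) acc (by simpa using hf)]
      simp [Nat.succ_sub_succ]

theorem pv_splitOn_three (a b c : List Char) (ha : '_' ∉ a) (hb : '_' ∉ b) (hc : '_' ∉ c) :
    PySem.Chars.splitOn (a ++ '_' :: b ++ '_' :: c) ['_'] = [a, b, c] := by
  unfold PySem.Chars.splitOn
  rw [show a ++ '_' :: b ++ '_' :: c = a ++ ('_' :: (b ++ '_' :: c)) by simp]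
  rw [pv_splitGo_no_sep a ha _ _ _ _ (by simp)]
  rw [show (a ++ ('_' :: (b ++ '_' :: c))).length + 1 - a.length
        = (b ++ '_' :: c).length + 2 by simp; omega]
  rw [show ((b ++ '_' :: c).length + 2) = ((b ++ '_' :: c).length + 1) + 1 by omega]
  rw [pv_splitGo_sep]
  rw [show b ++ '_' :: c = b ++ ('_' :: c) by rfl]
  rw [pv_splitGo_no_sep b hb _ _ _ _ (by simp)]
  rw [show (b ++ '_' :: c).length + 1 - b.length = c.length + 1 + 1 by simp; omega]
  rw [pv_splitGo_sep]
  rw [show c = c ++ ([] : List Char) by simp]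
  rw [pv_splitGo_no_sep c hc _ _ _ _ (by simp)]
  rw [pv_splitGo_nil]
  simp

theorem pv_lastInd_interStr (i j : Int) :
    (PySem.List.pyGet? (((PySem.Str.split? ("intersect_" ++ PySem.Int.toStr i ++ "_" ++ PySem.Int.toStr j) "_")).getD []) (-1)).getD ""
      = PySem.Int.toStr j := by
  have hsplit : PySem.Chars.splitOn
      ("intersect_" ++ PySem.Int.toStr i ++ "_" ++ PySem.Int.toStr j).toList ['_']
      = ["intersect".toList, PySem.Int.toChars i, PySem.Int.toChars j] := by
    rw [show ("intersect_" ++ PySem.Int.toStr i ++ "_" ++ PySem.Int.toStr j).toList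
          = "intersect".toList ++ '_' :: PySem.Int.toChars i ++ '_' :: PySem.Int.toChars j
        from by simp [String.toList_append]]
    exact pv_splitOn_three _ _ _ (by decide) (pv_und_not_mem_toChars i) (pv_und_not_mem_toChars j)
  rw [show PySem.Str.split? ("intersect_" ++ PySem.Int.toStr i ++ "_" ++ PySem.Int.toStr j) "_"
        = (PySem.Chars.split?
            ("intersect_" ++ PySem.Int.toStr i ++ "_" ++ PySem.Int.toStr j).toList ['_']).map
            (List.map String.ofList) from rfl]
  rw [show PySem.Chars.split?
        ("intersect_" ++ PySem.Int.toStr i ++ "_" ++ PySem.Int.toStr j).toList ['_']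
        = some (PySem.Chars.splitOn
            ("intersect_" ++ PySem.Int.toStr i ++ "_" ++ PySem.Int.toStr j).toList ['_'])
      from by simp [PySem.Chars.split?]]
  rw [hsplit]
  simp [PySem.List.pyGet?_neg_one, PySem.Int.toStr]

-- mergeStepA on the two instruction shapes
theorem pv_mergeStepA_hop (ans : List String) (i j : Int) :
    mergeStepA ans ("hop_" ++ PySem.Int.toStr i ++ "_" ++ PySem.Int.toStr j)
      = ans ++ ["hop_" ++ PySem.Int.toStr i ++ "_" ++ PySem.Int.toStr j] := by
  unfold mergeStepA
  cases h : ans.getLast? with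
  | none => rfl
  | some l => rw [pv_isIn_hop]; simp

-- B's flag is exactly "the last element of ans contains 'inter'"
def LiOK (sB : StB) : Prop :=
  match sB.ans.getLast? with
  | none => sB.lastInter = false
  | some l => sB.lastInter = PySem.Str.isIn "inter" l

-- the loop invariant relating A's first-pass state to B's fused state
def InvAB (sA : StA) (sB : StB) : Prop :=
  sA.flag = false ∧
  sA.prevEnd = sB.prevEnd ∧
  sA.prevEnd ≠ none ∧
  sA.stack.map (fun e => (e.1.2.getD 0, e.2)) = sB.stack ∧
  (∀ e ∈ sA.stack, e.1.2 ≠ none) ∧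
  sA.insts.foldl mergeStepA [] = sB.ans ∧
  LiOK sB

-- emitting an intersect instruction: A's merge step equals B's flag-guided emission
theorem pv_emit_inter (s2 : StB) (i j : Int) (hli : LiOK s2) :
    mergeStepA s2.ans ("intersect_" ++ PySem.Int.toStr i ++ "_" ++ PySem.Int.toStr j)
      = (emitInterB s2 i j).ans
    ∧ LiOK (emitInterB s2 i j)
    ∧ (emitInterB s2 i j).prevEnd = s2.prevEnd
    ∧ (emitInterB s2 i j).stack = s2.stack := by
  unfold LiOK at hli
  cases h : s2.ans.getLast? with
  | none =>
    rw [h] at hli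
    have red : mergeStepA s2.ans ("intersect_" ++ PySem.Int.toStr i ++ "_" ++ PySem.Int.toStr j)
        = s2.ans ++ ["intersect_" ++ PySem.Int.toStr i ++ "_" ++ PySem.Int.toStr j] := by
      unfold mergeStepA
      rw [h]
    have redB : emitInterB s2 i j
        = { s2 with ans := s2.ans ++ ["intersect_" ++ PySem.Int.toStr i ++ "_" ++ PySem.Int.toStr j],
                    lastInter := true } := by
      unfold emitInterB
      rw [if_neg (by simp [hli])]
    rw [red, redB]
    refine ⟨by trivial, ?_, by trivial, by trivial⟩
    unfold LiOK
    simp only [List.getLast?_concat]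
    exact (pv_isIn_interStr i j).symm
  | some l =>
    rw [h] at hli
    have red : mergeStepA s2.ans ("intersect_" ++ PySem.Int.toStr i ++ "_" ++ PySem.Int.toStr j)
        = if (PySem.Str.isIn "inter" ("intersect_" ++ PySem.Int.toStr i ++ "_" ++ PySem.Int.toStr j)
              && PySem.Str.isIn "inter" l) = true then
            s2.ans.dropLast ++ [l ++ "_" ++
              (PySem.List.pyGet? ((PySem.Str.split? ("intersect_" ++ PySem.Int.toStr i ++ "_" ++ PySem.Int.toStr j) "_").getD []) (-1)).getD ""]
          else s2.ans ++ ["intersect_" ++ PySem.Int.toStr i ++ "_" ++ PySem.Int.toStr j] := by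
      unfold mergeStepA
      rw [h]
    by_cases hin : PySem.Str.isIn "inter" l = true
    · have hlt : s2.lastInter = true := hli.trans hin
      have redB : emitInterB s2 i j
          = { s2 with ans := s2.ans.dropLast ++ [(s2.ans.getLast?.getD "") ++ "_" ++ PySem.Int.toStr j] } := by
        unfold emitInterB
        rw [if_pos hlt]
      rw [red, pv_isIn_interStr, hin, pv_lastInd_interStr, redB, h]
      simp only [Bool.and_self, if_true, Option.getD_some]
      refine ⟨by trivial, ?_, by trivial, by trivial⟩
      unfold LiOK
      simp only [List.getLast?_concat]
      rw [hlt]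
      exact (pv_isIn_append _ _ (pv_isIn_append _ _ hin)).symm
    · simp only [Bool.not_eq_true] at hin
      have hlf : s2.lastInter = false := hli.trans hin
      have redB : emitInterB s2 i j
          = { s2 with ans := s2.ans ++ ["intersect_" ++ PySem.Int.toStr i ++ "_" ++ PySem.Int.toStr j],
                      lastInter := true } := by
        unfold emitInterB
        rw [if_neg (by simp [hlf])]
      rw [red, pv_isIn_interStr, hin, redB]
      simp only [Bool.and_false, Bool.false_eq_true, if_false]
      refine ⟨by trivial, ?_, by trivial, by trivial⟩
      unfold LiOK
      simp only [List.getLast?_concat]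
      exact (pv_isIn_interStr i j).symm

-- the trailing path_stack block preserves the invariant
theorem pv_stackCheck (ind : Int) (chain : List Int) (s1 : StA) (s2 : StB)
    (h : InvAB s1 s2) (hpe2 : s2.prevEnd = PySem.List.pyGet? chain (-1)) :
    InvAB (stackCheckA ind chain s1) (stackCheckB ind (PySem.List.pyGet? chain (-1)) s2) := by
  obtain ⟨hf, hpe, hpn, hst, hN, hans, hli⟩ := h
  have hA : PySem.List.pyGet? s1.stack (-1) = s1.stack.getLast? := PySem.List.pyGet?_neg_one _
  have hB : PySem.List.pyGet? s2.stack (-1)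
      = (s1.stack.getLast?).map (fun e => (e.1.2.getD 0, e.2)) := by
    rw [← hst, PySem.List.pyGet?_neg_one, List.getLast?_map]
  unfold stackCheckA stackCheckB
  rw [hA, hB]
  cases htop : s1.stack.getLast? with
  | none => exact ⟨hf, hpe, hpn, hst, hN, hans, hli⟩
  | some top =>
    simp only [Option.map_some]
    obtain ⟨v, hv⟩ := Option.ne_none_iff_exists'.mp (hN top (List.mem_of_getLast? htop))
    rw [hv]
    simp only [Option.getD_some]
    by_cases hcond : ((some v : Option Int) == PySem.List.pyGet? chain (-1)) = true
    · rw [if_pos hcond, if_pos hcond]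
      have hsome : PySem.List.pyGet? chain (-1) = some v := (beq_iff_eq.mp hcond).symm
      obtain ⟨he1, he2, he3, he4⟩ := pv_emit_inter s2 top.2 ind hli
      refine ⟨hf, ?_, ?_, ?_, ?_, ?_, ?_⟩
      · show PySem.List.pyGet? chain (-1) = (emitInterB s2 top.2 ind).prevEnd
        rw [he3, hpe2]
      · show PySem.List.pyGet? chain (-1) ≠ none
        rw [hsome]
        simp
      · show List.map _ s1.stack.dropLast = (emitInterB s2 top.2 ind).stack.dropLast
        rw [List.map_dropLast, hst, he4]
      · intro e hmem
        exact hN e (List.mem_of_mem_dropLast hmem)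
      · show List.foldl mergeStepA [] (s1.insts ++ [_]) = (emitInterB s2 top.2 ind).ans
        rw [List.foldl_concat, hans, he1]
      · exact he2
    · rw [if_neg hcond, if_neg hcond]
      exact ⟨hf, hpe, hpn, hst, hN, hans, hli⟩

theorem pv_step_preserves (sA : StA) (sB : StB) (ind : Int) (chain : List Int)
    (hc : chain ≠ []) (h : InvAB sA sB) : InvAB (stepA sA (ind, chain)) (stepB sB (ind, chain)) := by
  obtain ⟨hf, hpe, hpn, hst, hN, hans, hli⟩ := h
  have hl : PySem.List.pyGet? chain (-1) ≠ none := by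
    rw [PySem.List.pyGet?_neg_one]
    simpa [List.getLast?_eq_none_iff] using hc
  unfold stepA stepB
  rw [if_neg (by simp [hf] : ¬ (sA.flag = true))]
  rw [hpe]
  by_cases h1 : (sB.prevEnd == PySem.List.pyGet? chain 0) = true
  · -- hop branch
    rw [if_pos h1, if_pos h1]
    apply pv_stackCheck _ _ _ _ _ rfl
    refine ⟨hf, rfl, hl, hst, hN, ?_, ?_⟩
    · show List.foldl mergeStepA [] (sA.insts ++ [_]) = _
      rw [List.foldl_concat, hans, pv_mergeStepA_hop]
    · unfold LiOK
      simp only [List.getLast?_concat]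
      exact (pv_isIn_hop (ind - 1) ind).symm
  · -- intersect / else
    rw [if_neg h1, if_neg h1]
    by_cases h2 : (sB.prevEnd == PySem.List.pyGet? chain (-1)) = true
    · rw [if_pos h2, if_pos h2]
      apply pv_stackCheck _ _ _ _ _ rfl
      obtain ⟨he1, he2, he3, he4⟩ := pv_emit_inter sB (ind - 1) ind hli
      refine ⟨hf, rfl, hl, ?_, hN, ?_, ?_⟩
      · show List.map _ sA.stack = (emitInterB sB (ind - 1) ind).stack
        rw [hst, he4]
      · show List.foldl mergeStepA [] (sA.insts ++ [_]) = (emitInterB sB (ind - 1) ind).ans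
        rw [List.foldl_concat, hans, he1]
      · exact he2
    · rw [if_neg h2, if_neg h2]
      refine ⟨rfl, rfl, hl, ?_, ?_, hans, hli⟩
      · show List.map _ (sA.stack ++ [((sA.prevStart, sB.prevEnd), ind - 1)]) = _
        rw [List.map_append, hst]
        rfl
      · intro e hmem
        rcases List.mem_append.mp hmem with hmem | hmem
        · exact hN e hmem
        · simp only [List.mem_singleton] at hmem
          rw [hmem]
          exact hpe ▸ hpn

theorem pv_loop (rest : List (List Int)) :
    ∀ (ind : Int) (sA : StA) (sB : StB), (∀ c ∈ rest, c ≠ []) → InvAB sA sB →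
    InvAB ((PySem.List.enumerate rest ind).foldl stepA sA)
          ((PySem.List.enumerate rest ind).foldl stepB sB) := by
  induction rest with
  | nil => intro ind sA sB _ h; simpa [PySem.List.enumerate_nil]
  | cons c rest ih =>
    intro ind sA sB hne h
    rw [PySem.List.enumerate_cons]
    simp only [List.foldl_cons]
    exact ih (ind + 1) _ _ (fun x hx => hne x (List.mem_cons_of_mem _ hx))
      (pv_step_preserves sA sB ind c (hne c (List.mem_cons_self)) h)

-- ===== VERDICT (by name: the statement is the Claim_ definition above) =====
theorem create_instructions_spec : Claim_equal_create_instructions := by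
  intro chains _ hpre
  unfold Spec_create_instructions
  cases chains with
  | nil => rfl
  | cons c0 rest =>
    unfold create_instructions create_instructions_alt
    rw [PySem.List.enumerate_cons]
    simp only [List.foldl_cons]
    have h0 : stepA ⟨[], none, none, [], true⟩ (0, c0)
        = ⟨[], none, PySem.List.pyGet? c0 (-1), [], false⟩ := by
      simp [stepA]
    rw [h0]
    have := pv_loop rest 1 ⟨[], none, PySem.List.pyGet? c0 (-1), [], false⟩
      ⟨[], false, PySem.List.pyGet? c0 (-1), []⟩
      (fun x hx => hpre x (List.mem_cons_of_mem _ hx))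
      (by
        refine ⟨rfl, rfl, ?_, rfl, by simp, rfl, rfl⟩
        rw [PySem.List.pyGet?_neg_one]
        simpa [List.getLast?_eq_none_iff] using hpre c0 List.mem_cons_self)
    exact this.2.2.2.2.2.1
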